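-- pv_equiv track=rewrite | github.com/ppoilbarbe/PBoule | python/generate_phases_finales.py | repartition_poules
-- ===== SOURCE A (Python) =====
-- def repartition_poules(n_total: int, base: int = 4) -> list[int]:
--     """Répartit n_total équipes en poules de taille base ou base+1."""
--     if n_total % (base + 1) == 0:
--         return [base + 1] * (n_total // (base + 1))
--     if n_total % base == 0:
--         return [base] * (n_total // base)
--     for n_poules in range(max(1, n_total // (base + 1)), n_total + 1):
--         x = n_total - n_poules * base
--         y = n_poules - x
--         if 0 <= x <= n_poules and y >= 0:
--             return [base + 1] * x + [base] * y
--     n_poules = max(1, n_total // base)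
--     reste = n_total - n_poules * base
--     return [base] * n_poules + ([reste] if reste else [])
-- ===== SOURCE B (Python) =====
-- def repartition_poules(n_total: int, base: int = 4) -> list[int]:
--     """Répartit n_total équipes en poules de taille base ou base+1."""
--     big = base + 1
--     # Stage 1: decide a plan, a list of (pool_size, count) blocks.
--     if n_total % big == 0:
--         plan = [(big, n_total // big)]
--     elif n_total % base == 0:
--         plan = [(base, n_total // base)]
--     else:
--         p = -(-n_total // big)  # ceil(n_total / big): fewest pools of size <= big
--         x = n_total - p * base  # pools that must get one extra team
--         if 0 <= x <= p:
--             plan = [(big, x), (base, p - x)]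
--         else:
--             q = max(1, n_total // base)
--             r = n_total - q * base
--             plan = [(base, q)] + ([(r, 1)] if r else [])
--     # Stage 2: materialise the plan.
--     out = []
--     for size, cnt in plan:
--         for _ in range(cnt):
--             out.append(size)
--     return out
-- ===== Notes on version B (the rewrite author's own statement) =====
-- stated objective: faster
-- what changed: B is decomposed into a planning stage that produces a list of (pool_size, count) blocks -- using the closed form n_poules = ceil(n_total/(base+1)) with one feasibility check instead of A's linear search over range(max(1, n_total//(base+1)), n_total+1) -- and a separate materialisation loop that expands the blocks into the output list.
import Mathlib
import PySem

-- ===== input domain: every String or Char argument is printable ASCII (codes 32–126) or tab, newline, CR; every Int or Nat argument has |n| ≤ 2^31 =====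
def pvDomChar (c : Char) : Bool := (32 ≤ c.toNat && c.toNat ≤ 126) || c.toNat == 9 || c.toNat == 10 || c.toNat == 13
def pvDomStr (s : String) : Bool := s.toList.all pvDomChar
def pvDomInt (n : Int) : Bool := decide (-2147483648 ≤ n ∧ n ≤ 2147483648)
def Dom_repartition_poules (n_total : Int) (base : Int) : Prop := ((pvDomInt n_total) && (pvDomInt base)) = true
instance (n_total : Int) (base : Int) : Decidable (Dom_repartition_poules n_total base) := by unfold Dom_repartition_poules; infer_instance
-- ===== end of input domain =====

-- B plans the answer as (pool_size, count) blocks via the closed form ceil(n_total/(base+1)) instead of A's linear search, then materialises the blocks; return values agree whenever base ≠ -1 (where both programs divide by zero).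


-- ===== PORT A =====
def repartition_poules (n_total : Int) (base : Int) : List Int :=
  if PySem.Int.mod n_total (base + 1) = 0 then
    List.replicate (PySem.Int.floordiv n_total (base + 1)).toNat (base + 1)
  else if PySem.Int.mod n_total base = 0 then
    List.replicate (PySem.Int.floordiv n_total base).toNat base
  else
    -- for n_poules in range(max(1, n_total // (base+1)), n_total + 1): return on first hit
    match (PySem.List.pyRange (max 1 (PySem.Int.floordiv n_total (base + 1))) (n_total + 1) 1).find?
        (fun p => decide (0 ≤ n_total - p * base) && decide (n_total - p * base ≤ p)
          && decide (0 ≤ p - (n_total - p * base))) with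
    | some p =>
        List.replicate (n_total - p * base).toNat (base + 1)
          ++ List.replicate (p - (n_total - p * base)).toNat base
    | none =>
        let n_poules := max 1 (PySem.Int.floordiv n_total base)
        let reste := n_total - n_poules * base
        List.replicate n_poules.toNat base ++ (if reste ≠ 0 then [reste] else [])

-- ===== PORT B =====
-- Stage 2 of Source B: the nested for-loop expanding each (size, cnt) block into cnt copies of size.
def pvMaterialise : List (Int × Int) → List Int
  | [] => []
  | (size, cnt) :: rest => List.replicate cnt.toNat size ++ pvMaterialise rest

def repartition_poules_alt (n_total : Int) (base : Int) : List Int :=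
  let big := base + 1
  let plan : List (Int × Int) :=
    if PySem.Int.mod n_total big = 0 then
      [(big, PySem.Int.floordiv n_total big)]
    else if PySem.Int.mod n_total base = 0 then
      [(base, PySem.Int.floordiv n_total base)]
    else
      let p := -(PySem.Int.floordiv (-n_total) big)
      let x := n_total - p * base
      if 0 ≤ x ∧ x ≤ p then
        [(big, x), (base, p - x)]
      else
        let q := max 1 (PySem.Int.floordiv n_total base)
        let r := n_total - q * base
        (base, q) :: (if r ≠ 0 then [(r, 1)] else [])
  pvMaterialise plan

-- ===== PRECONDITION & SPEC =====
-- Pre_ excludes exactly base = -1, where A's first guard computes n_total % 0 and raises ZeroDivisionError (and so does B).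
def Pre_repartition_poules (n_total : Int) (base : Int) : Prop := base ≠ -1
instance (n_total : Int) (base : Int) : Decidable (Pre_repartition_poules n_total base) := by
  unfold Pre_repartition_poules; infer_instance

def pvWitness_repartition_poules : Int × Int := (23, 4)

def Spec_repartition_poules (n_total : Int) (base : Int) (out : List Int) : Prop := out = repartition_poules_alt n_total base
instance (n_total : Int) (base : Int) (out : List Int) : Decidable (Spec_repartition_poules n_total base out) := by unfold Spec_repartition_poules; infer_instance

-- ===== CLAIM (what is proved, stated in full; the proofs are below) =====
def Claim_equal_repartition_poules : Prop := ∀ (n_total : Int) (base : Int), Dom_repartition_poules n_total base → Pre_repartition_poules n_total base → Spec_repartition_poules n_total base (repartition_poules n_total base)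

-- ===== LEMMAS AND PROOFS =====

lemma find?_pyRange_none (q : Int → Bool) (s e : Int)
    (h : ∀ p, s ≤ p → p < e → q p = false) :
    (PySem.List.pyRange s e 1).find? q = none := by
  have hgen : ∀ k : Nat, ∀ s : Int, e - s ≤ k →
      (∀ p, s ≤ p → p < e → q p = false) →
      (PySem.List.pyRange s e 1).find? q = none := by
    intro k
    induction k with
    | zero =>
        intro s hk _
        rw [PySem.List.pyRange_one_eq_nil (by omega)]; rfl
    | succ k ih =>
        intro s hk h
        by_cases hse : e ≤ s
        · rw [PySem.List.pyRange_one_eq_nil hse]; rfl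
        · rw [not_le] at hse
          rw [PySem.List.pyRange_one_cons hse, List.find?_cons, h s le_rfl hse]
          exact ih (s + 1) (by omega) (fun p hp1 hp2 => h p (by omega) hp2)
  exact hgen (e - s).toNat s (by omega) h

lemma find?_pyRange_some (q : Int → Bool) (s e t : Int)
    (h1 : s ≤ t) (h2 : t < e)
    (h3 : ∀ p, s ≤ p → p < t → q p = false) (h4 : q t = true) :
    (PySem.List.pyRange s e 1).find? q = some t := by
  have hgen : ∀ k : Nat, ∀ s : Int, t - s ≤ k → s ≤ t →
      (∀ p, s ≤ p → p < t → q p = false) →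
      (PySem.List.pyRange s e 1).find? q = some t := by
    intro k
    induction k with
    | zero =>
        intro s hk hst _
        have hst' : s = t := by omega
        subst hst'
        rw [PySem.List.pyRange_one_cons (by omega), List.find?_cons, h4]
    | succ k ih =>
        intro s hk hst h
        by_cases hs : s = t
        · subst hs
          rw [PySem.List.pyRange_one_cons (by omega), List.find?_cons, h4]
        · rw [PySem.List.pyRange_one_cons (by omega), List.find?_cons,
            h s le_rfl (by omega)]
          exact ih (s + 1) (by omega) (by omega) (fun p hp1 hp2 => h p (by omega) hp2)
  exact hgen (t - s).toNat s (by omega) h1 h3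

-- ===== VERDICT (by name: the statement is the Claim_ definition above) =====
theorem repartition_poules_spec : Claim_equal_repartition_poules := by
  intro n b _ hpre
  unfold Spec_repartition_poules repartition_poules repartition_poules_alt
  by_cases h1 : PySem.Int.mod n (b + 1) = 0
  · simp [h1, pvMaterialise]
  by_cases h2 : PySem.Int.mod n b = 0
  · simp [h1, h2, pvMaterialise]
  simp only [h1, h2, if_false]
  have hn0 : n ≠ 0 := by
    intro h; subst h
    exact h1 ((PySem.Int.mod_eq_zero_iff_dvd 0 (b + 1)).mpr (dvd_zero _))
  have hb0 : b ≠ 0 := by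
    intro h; subst h
    exact h1 ((PySem.Int.mod_eq_zero_iff_dvd n 1).mpr (one_dvd _))
  have hbne : b ≠ -1 := hpre
  have hbcase : 1 ≤ b ∨ b ≤ -2 := by omega
  set c : Int := -(PySem.Int.floordiv (-n) (b + 1)) with hcdef
  rcases hbcase with hb | hb
  · -- base ≥ 1
    have hbp : (0 : Int) < b + 1 := by omega
    have hcb : (c - 1) * (b + 1) < n ∧ n ≤ c * (b + 1) :=
      (PySem.Int.neg_floordiv_neg_eq_iff_of_pos hbp).mp hcdef.symm
    by_cases hn : 0 < n
    · have hf : (PySem.Int.floordiv n (b + 1)) * (b + 1) ≤ n ∧ n < ((PySem.Int.floordiv n (b + 1)) + 1) * (b + 1) :=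
        (PySem.Int.floordiv_eq_iff_of_pos hbp).mp rfl
      have hc1 : 1 ≤ c := by nlinarith [hcb.2]
      have hsc : max 1 (PySem.Int.floordiv n (b + 1)) ≤ c := by
        have : PySem.Int.floordiv n (b + 1) ≤ c := by nlinarith [hf.1, hcb.2]
        omega
      have hcn : c < n + 1 := by nlinarith [hcb.1]
      have hlow : ∀ p : Int, max 1 (PySem.Int.floordiv n (b + 1)) ≤ p → p < c →
          (decide (0 ≤ n - p * b) && decide (n - p * b ≤ p) && decide (0 ≤ p - (n - p * b))) = false := by
        intro p _ hpc
        have : p * (b + 1) < n := by nlinarith [hcb.1]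
        apply Bool.eq_false_iff.mpr
        intro hq
        simp only [Bool.and_eq_true, decide_eq_true_eq] at hq
        nlinarith [hq.1.2]
      by_cases hx : c * b ≤ n
      · -- success: the loop's first hit is exactly c
        have hqc : (decide (0 ≤ n - c * b) && decide (n - c * b ≤ c) && decide (0 ≤ c - (n - c * b))) = true := by
          have h' : c * (b + 1) = c * b + c := by ring
          simp only [Bool.and_eq_true, decide_eq_true_eq]
          refine ⟨⟨by omega, by omega⟩, by omega⟩
        rw [find?_pyRange_some _ _ _ c hsc hcn hlow hqc]
        have hcond : 0 ≤ n - c * b ∧ n - c * b ≤ c := by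
          have h' : c * (b + 1) = c * b + c := by ring
          exact ⟨by omega, by omega⟩
        rw [if_pos hcond]
        simp [pvMaterialise]
      · -- no hit anywhere: both take the fallback
        rw [not_le] at hx
        have hnone : ∀ p : Int, max 1 (PySem.Int.floordiv n (b + 1)) ≤ p → p < n + 1 →
            (decide (0 ≤ n - p * b) && decide (n - p * b ≤ p) && decide (0 ≤ p - (n - p * b))) = false := by
          intro p hp1 hp2
          rcases lt_or_ge p c with hpc | hcp
          · exact hlow p hp1 hpc
          · have : n < p * b := by nlinarith
            apply Bool.eq_false_iff.mpr
            intro hq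
            simp only [Bool.and_eq_true, decide_eq_true_eq] at hq
            omega
        rw [find?_pyRange_none _ _ _ hnone]
        have hcond : ¬ (0 ≤ n - c * b ∧ n - c * b ≤ c) := by
          intro h; omega
        rw [if_neg hcond]
        by_cases hr : n - (max 1 (PySem.Int.floordiv n b)) * b ≠ 0 <;>
          simp [hr, pvMaterialise]
    · -- n ≤ 0, hence n ≤ -1: the loop range is empty and B's check fails
      rw [not_lt] at hn
      have hn1 : n ≤ -1 := by omega
      have hnone : ∀ p : Int, max 1 (PySem.Int.floordiv n (b + 1)) ≤ p → p < n + 1 →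
          (decide (0 ≤ n - p * b) && decide (n - p * b ≤ p) && decide (0 ≤ p - (n - p * b))) = false := by
        intro p hp1 hp2; omega
      rw [find?_pyRange_none _ _ _ hnone]
      have hc0 : c ≤ 0 := by nlinarith [hcb.1]
      have hcond : ¬ (0 ≤ n - c * b ∧ n - c * b ≤ c) := by
        rintro ⟨hA, hB⟩
        have hx0 : n - c * b = 0 := by omega
        have hcc : c = 0 := by omega
        rw [hcc] at hx0
        simp at hx0
        omega
      rw [if_neg hcond]
      by_cases hr : n - (max 1 (PySem.Int.floordiv n b)) * b ≠ 0 <;>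
        simp [hr, pvMaterialise]
  · -- base ≤ -2
    have hbn : b + 1 < 0 := by omega
    have hr := PySem.Int.mod_neg_bounds (a := -n) hbn
    have hfm := PySem.Int.floordiv_mul_add_mod (-n) (b + 1)
    have hy : c * (b + 1) = n + PySem.Int.mod (-n) (b + 1) := by
      rw [hcdef]; nlinarith [hfm]
    have hrne : PySem.Int.mod (-n) (b + 1) ≠ 0 := by
      intro h
      have : (b + 1) ∣ (-n) := (PySem.Int.mod_eq_zero_iff_dvd (-n) (b + 1)).mp h
      exact h1 ((PySem.Int.mod_eq_zero_iff_dvd n (b + 1)).mpr (Int.dvd_neg.mp this))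
    have hnone : ∀ p : Int, max 1 (PySem.Int.floordiv n (b + 1)) ≤ p → p < n + 1 →
        (decide (0 ≤ n - p * b) && decide (n - p * b ≤ p) && decide (0 ≤ p - (n - p * b))) = false := by
      intro p hp1 hp2
      have hp : 1 ≤ p := by omega
      have hpm : p * (b + 1) ≤ -p := by nlinarith
      apply Bool.eq_false_iff.mpr
      intro hq
      simp only [Bool.and_eq_true, decide_eq_true_eq] at hq
      have : n ≤ p * (b + 1) := by nlinarith [hq.1.2]
      omega
    rw [find?_pyRange_none _ _ _ hnone]
    have hcond : ¬ (0 ≤ n - c * b ∧ n - c * b ≤ c) := by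
      rintro ⟨hA, hB⟩
      have h' : c * (b + 1) = c * b + c := by ring
      by_cases hcc : n - c * b ≤ c
      · have : PySem.Int.mod (-n) (b + 1) = 0 := by omega
        exact hrne this
      · exact hcc hB
    rw [if_neg hcond]
    by_cases hrr : n - (max 1 (PySem.Int.floordiv n b)) * b ≠ 0 <;>
      simp [hrr, pvMaterialise]
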